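-- pv_equiv track=rewrite | github.com/EFulmer/leetcode-solutions | python/1800_maximum_ascending_subarray_sum.py | get_ascending_subarray_sum_starting_from
-- ===== SOURCE A (Python) =====
-- def get_ascending_subarray_sum_starting_from(
--     xs: list[int], start: int
-- ) -> tuple[int, int]:
--     subarray_sum = last = xs[start]
--     i = start + 1
--     while i < len(xs):
--         if xs[i] <= last:
--             break
--         else:
--             last = xs[i]
--             subarray_sum += last
--         i += 1
--     return i, subarray_sum
-- ===== SOURCE B (Python) =====
-- def get_ascending_subarray_sum_starting_from(
--     xs: list[int], start: int
-- ) -> tuple[int, int]: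
--     n = len(xs)
--     xs[start]  # validate start (IndexError for start outside [-n, n), as in A)
--     j = start + n if start < 0 else start
--     # One backward pass over the suffix xs[j:]: maintain (end, total) of the
--     # maximal strictly-ascending run starting at the current position,
--     # restarting the run at every non-ascent.
--     end = total = 0
--     for k in reversed(range(j, n)):
--         if k + 1 < n and xs[k + 1] > xs[k]:
--             total += xs[k]
--         else:
--             end, total = k + 1, xs[k]
--     return end, total
-- ===== Notes on version B (the rewrite author's own statement) =====
-- stated objective: alternative
-- what changed: B replaces A's forward scan that accumulates a running sum while tracking the last element with a single backward pass over the whole suffix xs[j:] that rebuilds the (end, sum) of the ascending run at each position, restarting at every non-ascent, and reads off the answer at the normalized start; negative starts are normalized as ordinary Python indices instead of A's raw wraparound scan.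
-- intended difference: For negative start A keeps scanning with raw negative indices, returning a wrapped end index and possibly double-counting elements past the array end; B treats a negative start as the standard Python index start+len and returns the run's true end index and sum inside the array, which is the intended result. — e.g. on get_ascending_subarray_sum_starting_from([1, 2], -2): A returns (0, 3), B returns (2, 3)
import Mathlib
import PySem

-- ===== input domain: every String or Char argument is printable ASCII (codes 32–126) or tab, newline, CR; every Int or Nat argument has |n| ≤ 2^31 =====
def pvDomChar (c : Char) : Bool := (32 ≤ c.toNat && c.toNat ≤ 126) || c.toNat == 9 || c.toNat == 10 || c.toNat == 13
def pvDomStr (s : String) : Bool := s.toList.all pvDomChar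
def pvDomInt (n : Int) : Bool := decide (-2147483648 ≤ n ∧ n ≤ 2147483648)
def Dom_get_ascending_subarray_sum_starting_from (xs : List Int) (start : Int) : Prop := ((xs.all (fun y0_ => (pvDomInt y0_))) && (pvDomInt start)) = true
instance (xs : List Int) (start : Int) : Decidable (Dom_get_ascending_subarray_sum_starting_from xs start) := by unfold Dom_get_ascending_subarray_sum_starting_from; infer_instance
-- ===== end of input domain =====

-- B replaces A's forward accumulating scan with one backward pass over the suffix from the
-- normalized start, rebuilding (end, sum) of the run at each position (objective: alternative);
-- on negative starts B returns the normalized in-array run instead of A's wraparound scan (D_ below).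

-- ===== PORT A =====
-- while i < len(xs): if xs[i] <= last: break else: last = xs[i]; sum += xs[i]; i += 1
def pvALoop (xs : List Int) (fuel : Nat) (i last s : Int) : Int × Int :=
  match fuel with
  | 0 => (i, s)
  | f + 1 =>
    if i < (xs.length : Int) then
      let x := PySem.List.pyGetD xs i 0
      if x ≤ last then (i, s)
      else pvALoop xs f (i + 1) x (s + x)
    else (i, s)

def get_ascending_subarray_sum_starting_from (xs : List Int) (start : Int) : Int × Int :=
  match PySem.List.pyGet? xs start with
  | none => (0, 0)  -- IndexError on xs[start]; excluded by Pre_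
  | some first => pvALoop xs (2 * xs.length + 1) (start + 1) first first

-- ===== PORT B =====
-- xs[start] validation, j = start + n if start < 0 else start, then
-- for k in reversed(range(j, n)): update (end, total), restarting at each non-ascent
def get_ascending_subarray_sum_starting_from_alt (xs : List Int) (start : Int) : Int × Int :=
  match PySem.List.pyGet? xs start with
  | none => (0, 0)  -- IndexError on xs[start]; excluded by Pre_
  | some _ =>
    let n : Int := (xs.length : Int)
    let j : Int := if start < 0 then start + n else start
    (PySem.List.pyRange j n 1).reverse.foldl
      (fun st k =>
        if k + 1 < n ∧ PySem.List.pyGetD xs k 0 < PySem.List.pyGetD xs (k + 1) 0 then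
          (st.1, st.2 + PySem.List.pyGetD xs k 0)
        else (k + 1, PySem.List.pyGetD xs k 0))
      (0, 0)

-- ===== PRECONDITION & SPEC =====
-- Pre_ excludes exactly the starts outside [-len, len), where Python's xs[start] raises IndexError in both A and B.
def Pre_get_ascending_subarray_sum_starting_from (xs : List Int) (start : Int) : Prop :=
  PySem.Raise.InRange xs.length start
instance (xs : List Int) (start : Int) : Decidable (Pre_get_ascending_subarray_sum_starting_from xs start) := by
  unfold Pre_get_ascending_subarray_sum_starting_from; infer_instance

def pvWitness_get_ascending_subarray_sum_starting_from : List Int × Int := ([3, 5, 2], 0)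

-- For negative start A keeps scanning with raw negative indices, returning a wrapped end index and
-- possibly double-counting elements past the array end; B treats a negative start as the standard
-- Python index start+len and returns the run's true end index and sum inside the array, which is intended.
def D_get_ascending_subarray_sum_starting_from (xs : List Int) (start : Int) : Prop := start < 0
instance (xs : List Int) (start : Int) : Decidable (D_get_ascending_subarray_sum_starting_from xs start) := by
  unfold D_get_ascending_subarray_sum_starting_from; infer_instance

def Spec_get_ascending_subarray_sum_starting_from (xs : List Int) (start : Int) (out : Int × Int) : Prop := ¬ D_get_ascending_subarray_sum_starting_from xs start → out = get_ascending_subarray_sum_starting_from_alt xs start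
instance (xs : List Int) (start : Int) (out : Int × Int) : Decidable (Spec_get_ascending_subarray_sum_starting_from xs start out) := by unfold Spec_get_ascending_subarray_sum_starting_from; infer_instance

def pvDiffWitness_get_ascending_subarray_sum_starting_from : List Int × Int := ([1, 2], -2)
def pvDiffWitnessOut_get_ascending_subarray_sum_starting_from : (Int × Int) × (Int × Int) := ((0, 3), (2, 3))

-- ===== CLAIM (what is proved, stated in full; the proofs are below) =====
def Claim_unchanged_get_ascending_subarray_sum_starting_from : Prop := ∀ (xs : List Int) (start : Int), Dom_get_ascending_subarray_sum_starting_from xs start → Pre_get_ascending_subarray_sum_starting_from xs start → Spec_get_ascending_subarray_sum_starting_from xs start (get_ascending_subarray_sum_starting_from xs start)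
def Claim_changed_get_ascending_subarray_sum_starting_from : Prop := Dom_get_ascending_subarray_sum_starting_from (pvDiffWitness_get_ascending_subarray_sum_starting_from.1) (pvDiffWitness_get_ascending_subarray_sum_starting_from.2) ∧ Pre_get_ascending_subarray_sum_starting_from (pvDiffWitness_get_ascending_subarray_sum_starting_from.1) (pvDiffWitness_get_ascending_subarray_sum_starting_from.2) ∧ D_get_ascending_subarray_sum_starting_from (pvDiffWitness_get_ascending_subarray_sum_starting_from.1) (pvDiffWitness_get_ascending_subarray_sum_starting_from.2) ∧ get_ascending_subarray_sum_starting_from (pvDiffWitness_get_ascending_subarray_sum_starting_from.1) (pvDiffWitness_get_ascending_subarray_sum_starting_from.2) = pvDiffWitnessOut_get_ascending_subarray_sum_starting_from.1 ∧ get_ascending_subarray_sum_starting_from_alt (pvDiffWitness_get_ascending_subarray_sum_starting_from.1) (pvDiffWitness_get_ascending_subarray_sum_starting_from.2) = pvDiffWitnessOut_get_ascending_subarray_sum_starting_from.2 ∧ pvDiffWitnessOut_get_ascending_subarray_sum_starting_from.1 ≠ pvDiffWitnessOut_get_ascending_subarray_sum_starting_from.2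

def Claim_exact_get_ascending_subarray_sum_starting_from : Prop := ∀ (xs : List Int) (start : Int), Dom_get_ascending_subarray_sum_starting_from xs start → Pre_get_ascending_subarray_sum_starting_from xs start → D_get_ascending_subarray_sum_starting_from xs start → get_ascending_subarray_sum_starting_from xs start ≠ get_ascending_subarray_sum_starting_from_alt xs start

-- ===== LEMMAS AND PROOFS =====

-- (end, sum) of the maximal strictly-ascending run of xs starting at position k < xs.length.
def pvRun (xs : List Int) (k : Nat) : Int × Int :=
  if h : k + 1 < xs.length ∧ xs.getD k 0 < xs.getD (k + 1) 0 then
    ((pvRun xs (k + 1)).1, xs.getD k 0 + (pvRun xs (k + 1)).2)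
  else ((k : Int) + 1, xs.getD k 0)
termination_by xs.length - k
decreasing_by omega

-- B's backward fold over reversed(range(k, n)) computes pvRun at k.
lemma pvB_fold_eq (xs : List Int) : ∀ (m k : Nat), xs.length - k = m → k < xs.length →
    (PySem.List.pyRange (k : Int) (xs.length : Int) 1).reverse.foldl
      (fun st i =>
        if i + 1 < (xs.length : Int) ∧ PySem.List.pyGetD xs i 0 < PySem.List.pyGetD xs (i + 1) 0 then
          (st.1, st.2 + PySem.List.pyGetD xs i 0)
        else (i + 1, PySem.List.pyGetD xs i 0))
      (0, 0) = pvRun xs k := by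
  intro m
  induction m with
  | zero => intro k hm hk; exact absurd hk (by omega)
  | succ m ih =>
    intro k hm hk
    have hcast : ((k : Int) + 1) = ((k + 1 : Nat) : Int) := by push_cast; ring
    rw [List.foldl_reverse,
      PySem.List.pyRange_one_cons (show (k : Int) < (xs.length : Int) by exact_mod_cast hk),
      List.foldr_cons]
    by_cases hnext : k + 1 < xs.length
    · have hih := ih (k + 1) (by omega) hnext
      rw [List.foldl_reverse] at hih
      rw [hcast, hih]
      simp only [PySem.List.pyGetD_natCast]
      by_cases hasc : xs.getD k 0 < xs.getD (k + 1) 0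
      · rw [if_pos ⟨by exact_mod_cast hnext, hasc⟩]
        conv_rhs => rw [pvRun]
        rw [dif_pos ⟨hnext, hasc⟩]
        exact Prod.ext rfl (Int.add_comm _ _)
      · rw [if_neg (fun h => hasc h.2)]
        conv_rhs => rw [pvRun]
        rw [dif_neg (fun h => hasc h.2), hcast]
    · have hnil : PySem.List.pyRange ((k : Int) + 1) (xs.length : Int) 1 = [] := by
        apply PySem.List.pyRange_one_eq_nil
        have hlen : xs.length = k + 1 := by omega
        rw [hlen]; push_cast; omega
      rw [hnil, List.foldr_nil,
        if_neg (fun h => hnext (by exact_mod_cast h.1))]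
      conv_rhs => rw [pvRun]
      rw [dif_neg (fun h => hnext h.1)]
      simp only [PySem.List.pyGetD_natCast]

-- A's forward loop from k+1 carrying last = xs[k] also computes pvRun at k.
lemma pvA_loop_eq (xs : List Int) : ∀ (fuel k : Nat) (s : Int), k < xs.length →
    xs.length - k ≤ fuel →
    pvALoop xs fuel ((k : Int) + 1) (xs.getD k 0) s
      = ((pvRun xs k).1, s + (pvRun xs k).2 - xs.getD k 0) := by
  intro fuel
  induction fuel with
  | zero => intro k s hk hf; exact absurd hk (by omega)
  | succ f ih =>
    intro k s hk hf
    have hcast : ((k : Int) + 1) = ((k + 1 : Nat) : Int) := by push_cast; ring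
    by_cases hnext : k + 1 < xs.length
    · have hlt : (k : Int) + 1 < (xs.length : Int) := by exact_mod_cast hnext
      have hx : PySem.List.pyGetD xs ((k : Int) + 1) 0 = xs.getD (k + 1) 0 := by
        rw [hcast, PySem.List.pyGetD_natCast]
      by_cases hasc : xs.getD k 0 < xs.getD (k + 1) 0
      · have hstep : pvALoop xs (f + 1) ((k : Int) + 1) (xs.getD k 0) s
            = pvALoop xs f ((k : Int) + 1 + 1) (xs.getD (k + 1) 0) (s + xs.getD (k + 1) 0) := by
          simp only [pvALoop, if_pos hlt, hx]
          rw [if_neg (not_le.mpr hasc)]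
        have hc2 : (k : Int) + 1 + 1 = ((k + 1 : Nat) : Int) + 1 := by push_cast; ring
        rw [hstep, hc2, ih (k + 1) (s + xs.getD (k + 1) 0) hnext (by omega)]
        conv_rhs => rw [pvRun]
        rw [dif_pos ⟨hnext, hasc⟩]
        exact Prod.ext rfl (by ring)
      · have hbrk : pvALoop xs (f + 1) ((k : Int) + 1) (xs.getD k 0) s = ((k : Int) + 1, s) := by
          simp only [pvALoop, if_pos hlt, hx]
          rw [if_pos (not_lt.mp hasc)]
        rw [hbrk]
        conv_rhs => rw [pvRun]
        rw [dif_neg (fun h => hasc h.2)]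
        exact Prod.ext rfl (by ring)
    · have hge : ¬ ((k : Int) + 1 < (xs.length : Int)) := fun h => hnext (by exact_mod_cast h)
      have hend : pvALoop xs (f + 1) ((k : Int) + 1) (xs.getD k 0) s = ((k : Int) + 1, s) := by
        simp only [pvALoop, if_neg hge]
      rw [hend]
      conv_rhs => rw [pvRun]
      rw [dif_neg (fun h => hnext h.1)]
      exact Prod.ext rfl (by ring)

-- ===== VERDICT (by name: the statements are the Claim_ definitions above) =====
theorem get_ascending_subarray_sum_starting_from_spec : Claim_unchanged_get_ascending_subarray_sum_starting_from := by
  intro xs start _ hpre hnd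
  have h0 : 0 ≤ start := by
    by_contra h
    exact hnd (by simpa [D_get_ascending_subarray_sum_starting_from] using not_le.mp h)
  obtain ⟨k, hks⟩ : ∃ k : Nat, start = (k : Int) := ⟨start.toNat, (Int.toNat_of_nonneg h0).symm⟩
  subst hks
  have hne : PySem.List.pyGet? xs (k : Int) ≠ none := by
    simp only [ne_eq, PySem.List.pyGet?_eq_none_iff, not_not]
    exact hpre
  rw [PySem.List.pyGet?_natCast] at hne
  have hk : k < xs.length := by
    by_contra h
    exact hne (List.getElem?_eq_none (by omega))
  have hget : PySem.List.pyGet? xs (k : Int) = some (xs.getD k 0) := by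
    rw [PySem.List.pyGet?_natCast, List.getElem?_eq_getElem hk, List.getD_eq_getElem xs 0 hk]
  unfold get_ascending_subarray_sum_starting_from get_ascending_subarray_sum_starting_from_alt
  rw [hget]
  simp only [if_neg (show ¬ (k : Int) < 0 by omega)]
  rw [pvA_loop_eq xs (2 * xs.length + 1) k (xs.getD k 0) hk (by omega),
    pvB_fold_eq xs (xs.length - k) k rfl hk]
  exact Prod.ext rfl (by ring)

theorem get_ascending_subarray_sum_starting_from_changed : Claim_changed_get_ascending_subarray_sum_starting_from := by
  unfold Claim_changed_get_ascending_subarray_sum_starting_from; decide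

-- ---- tightness: A and B differ everywhere inside D_ (start < 0, within Pre_) ----

-- pvRun's end index lies in (k, xs.length].
lemma pvRun_bounds (xs : List Int) : ∀ (m k : Nat), xs.length - k = m → k < xs.length →
    (k : Int) + 1 ≤ (pvRun xs k).1 ∧ (pvRun xs k).1 ≤ (xs.length : Int) := by
  intro m
  induction m with
  | zero => intro k hm hk; exact absurd hk (by omega)
  | succ m ih =>
    intro k hm hk
    rw [pvRun]
    split_ifs with h
    · obtain ⟨h1, h2⟩ := ih (k + 1) (by omega) h.1
      exact ⟨le_trans (by push_cast; omega) h1, h2⟩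
    · constructor
      · exact le_refl _
      · push_cast; omega

-- If the run from k reaches the end of xs, then xs[k] ≤ xs[len-1].
lemma pvRun_end_mono (xs : List Int) : ∀ (m k : Nat), xs.length - k = m → k < xs.length →
    (pvRun xs k).1 = (xs.length : Int) → xs.getD k 0 ≤ xs.getD (xs.length - 1) 0 := by
  intro m
  induction m with
  | zero => intro k hm hk; exact absurd hk (by omega)
  | succ m ih =>
    intro k hm hk hend
    rw [pvRun] at hend
    split_ifs at hend with h
    · exact le_trans (le_of_lt h.2) (ih (k + 1) (by omega) h.1 hend)
    · have hkl : k = xs.length - 1 := by omega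
      rw [hkl]

-- A's loop started at a non-positive index i with last = xs[i-1] (Python indexing) either
-- stops at a non-positive index, or the run from the normalized predecessor reaches the end
-- of xs and the loop's final index is strictly below xs.length.
lemma pvA_neg_phase (xs : List Int) : ∀ (fuel : Nat) (i s : Int),
    -(xs.length : Int) < i → i ≤ 0 → (xs.length : Int) + 1 - i ≤ (fuel : Int) →
    (pvALoop xs fuel i (xs.getD (i + xs.length - 1).toNat 0) s).1 ≤ 0
    ∨ ((pvRun xs (i + xs.length - 1).toNat).1 = (xs.length : Int)
       ∧ (pvALoop xs fuel i (xs.getD (i + xs.length - 1).toNat 0) s).1 < (xs.length : Int)) := by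
  intro fuel
  induction fuel with
  | zero => intro i s h1 h2 h3; exact absurd h3 (by omega)
  | succ f ih =>
    intro i s h1 h2 h3
    have hn : 0 < xs.length := by omega
    have hilt : i < (xs.length : Int) := by omega
    by_cases hi0 : i = 0
    · subst hi0
      have hK : ((0 : Int) + xs.length - 1).toNat = xs.length - 1 := by omega
      have hx0 : PySem.List.pyGetD xs 0 0 = xs.getD 0 0 := PySem.List.pyGetD_zero xs 0
      by_cases hbr : xs.getD 0 0 ≤ xs.getD ((0 : Int) + xs.length - 1).toNat 0
      · left
        simp only [pvALoop, if_pos hilt, hx0, if_pos hbr]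
        exact le_refl _
      · right
        have hgo : pvALoop xs (f + 1) 0 (xs.getD ((0 : Int) + xs.length - 1).toNat 0) s
            = pvALoop xs f (((0 : Nat) : Int) + 1) (xs.getD 0 0) (s + xs.getD 0 0) := by
          simp only [pvALoop, if_pos hilt, hx0, if_neg hbr]
          norm_num
        rw [hgo, pvA_loop_eq xs f 0 (s + xs.getD 0 0) hn (by omega)]
        have hKrun : (pvRun xs ((0 : Int) + xs.length - 1).toNat).1 = (xs.length : Int) := by
          rw [hK, pvRun, dif_neg (by omega)]
          push_cast; omega
        refine ⟨hKrun, ?_⟩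
        have hb := pvRun_bounds xs xs.length 0 (by omega) hn
        rcases lt_or_eq_of_le hb.2 with hlt | heq
        · exact hlt
        · exfalso
          have := pvRun_end_mono xs xs.length 0 (by omega) hn heq
          rw [hK] at hbr
          omega
    · -- i < 0: xs[i] is xs.getD (k+1) with k the normalized predecessor
      have hineg : i < 0 := lt_of_le_of_ne h2 hi0
      have hk1 : (i + xs.length - 1).toNat + 1 = (i + xs.length).toNat := by omega
      have hk1lt : (i + xs.length).toNat < xs.length := by omega
      have hxneg : PySem.List.pyGetD xs i 0 = xs.getD (i + xs.length).toNat 0 := by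
        have hm0 : 0 < (-i).toNat := by omega
        have hmlen : (-i).toNat ≤ xs.length := by omega
        have hi : i = -(((-i).toNat : Nat) : Int) := by omega
        have hblt : xs.length - (-i).toNat < xs.length := by omega
        conv_lhs => rw [hi]
        rw [PySem.List.pyGetD_neg_natCast xs (-i).toNat 0 hm0 hmlen,
          ← List.getD_eq_getElem xs 0 hblt]
        have hidx : xs.length - (-i).toNat = (i + xs.length).toNat := by omega
        rw [hidx]
      by_cases hbr : PySem.List.pyGetD xs i 0 ≤ xs.getD (i + xs.length - 1).toNat 0
      · left
        simp only [pvALoop, if_pos hilt, if_pos hbr]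
        exact h2
      · have hgo : pvALoop xs (f + 1) i (xs.getD (i + xs.length - 1).toNat 0) s
            = pvALoop xs f (i + 1) (xs.getD ((i + 1) + xs.length - 1).toNat 0)
                (s + PySem.List.pyGetD xs i 0) := by
          simp only [pvALoop, if_pos hilt, if_neg hbr]
          rw [hxneg]
          congr 2
          omega
        rw [hgo]
        rcases ih (i + 1) (s + PySem.List.pyGetD xs i 0) (by omega) (by omega) (by omega) with
          hl | ⟨hrn, hlt2⟩
        · exact Or.inl hl
        · right
          refine ⟨?_, hlt2⟩
          have hknext : ((i + 1) + xs.length - 1).toNat = (i + xs.length - 1).toNat + 1 := by omega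
          rw [hknext] at hrn
          have hasc : xs.getD (i + xs.length - 1).toNat 0
              < xs.getD ((i + xs.length - 1).toNat + 1) 0 := by
            rw [hk1]
            rw [hxneg] at hbr
            omega
          rw [pvRun, dif_pos ⟨by omega, hasc⟩]
          exact hrn

theorem get_ascending_subarray_sum_starting_from_tight : Claim_exact_get_ascending_subarray_sum_starting_from := by
  intro xs start _ hpre hd
  have hneg : start < 0 := hd
  have hlo : -(xs.length : Int) ≤ start := hpre.1
  have hn : 0 < xs.length := by omega
  set j : Nat := (start + xs.length).toNat with hj
  have hjlt : j < xs.length := by omega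
  have hget : PySem.List.pyGet? xs start = some (xs.getD j 0) := by
    have hm0 : 0 < (-start).toNat := by omega
    have hmlen : (-start).toNat ≤ xs.length := by omega
    have hs : start = -((((-start).toNat : Nat)) : Int) := by omega
    have hblt : xs.length - (-start).toNat < xs.length := by omega
    conv_lhs => rw [hs]
    rw [PySem.List.pyGet?_neg_natCast xs (-start).toNat hm0 hmlen,
      List.getElem?_eq_getElem hblt, ← List.getD_eq_getElem xs 0 hblt]
    have hidx : xs.length - (-start).toNat = j := by omega
    rw [hidx]
  intro heq
  unfold get_ascending_subarray_sum_starting_from get_ascending_subarray_sum_starting_from_alt at heq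
  rw [hget] at heq
  simp only [if_pos hneg] at heq
  have hjcast : start + (xs.length : Int) = (j : Int) := by omega
  rw [hjcast, pvB_fold_eq xs (xs.length - j) j rfl hjlt] at heq
  have hphase := pvA_neg_phase xs (2 * xs.length + 1) (start + 1) (xs.getD j 0)
    (by omega) (by omega) (by push_cast; omega)
  have hkidx : ((start + 1) + xs.length - 1).toNat = j := by omega
  rw [hkidx] at hphase
  have hfst := congrArg Prod.fst heq
  simp only at hfst
  have hb := pvRun_bounds xs (xs.length - j) j rfl hjlt
  rcases hphase with hl | ⟨hrn, hlt2⟩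
  · rw [hfst] at hl
    omega
  · rw [hfst] at hlt2
    rw [hrn] at hlt2
    exact absurd hlt2 (by omega)
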